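-- pv_equiv track=rewrite | github.com/Haidram/codeforces_prblm_solutions | prblm_D_5May.py | solve
-- ===== SOURCE A (Python) =====
-- def solve(n,arr):
--     count = 0
--     b = [0]*n
--     for i in range(n):
--         b[i] = arr[i] - i
--     dict_arr = {}
--     for i in range(n):
--         if b[i] not in dict_arr:
--             dict_arr[b[i]] = 0
--         dict_arr[b[i]] += 1
--     for key,value in dict_arr.items():
--         if value > 1:
--             count += (value*(value-1))//2
--
--     return count
-- ===== SOURCE B (Python) =====
-- def solve(n, arr):
--     vals = sorted(arr[i] - i for i in range(n))
--     count = 0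
--     run = 0
--     prev = None
--     for v in vals:
--         if v == prev:
--             run += 1
--             count += run
--         else:
--             run = 0
--         prev = v
--     return count
-- ===== Notes on version B (the rewrite author's own statement) =====
-- stated objective: alternative
-- what changed: B sorts the values arr[i]-i and counts equal pairs by a run-length scan over adjacent elements of the sorted list, instead of A's hash-counter dict followed by a sum of C(k,2) over its items.
import Mathlib
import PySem

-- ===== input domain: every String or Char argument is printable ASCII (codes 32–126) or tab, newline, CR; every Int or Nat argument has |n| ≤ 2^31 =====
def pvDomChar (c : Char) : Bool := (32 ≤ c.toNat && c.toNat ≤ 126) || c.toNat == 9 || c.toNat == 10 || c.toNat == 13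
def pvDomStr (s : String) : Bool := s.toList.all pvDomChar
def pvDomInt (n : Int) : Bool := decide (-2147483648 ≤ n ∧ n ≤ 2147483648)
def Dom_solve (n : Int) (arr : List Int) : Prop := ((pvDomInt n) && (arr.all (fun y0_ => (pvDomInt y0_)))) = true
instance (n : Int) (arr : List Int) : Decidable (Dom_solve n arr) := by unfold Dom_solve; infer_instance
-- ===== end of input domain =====

-- B sorts the values arr[i]-i and counts equal pairs by a run-length scan over the sorted
-- list, instead of A's counting dict plus final sum of C(k,2) (objective: alternative).


-- ===== PORT A =====
-- the fill loop 'b = [0]*n; for i in range(n): b[i] = arr[i] - i' is ported as the map it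
-- writes; arr[i] is in range for every i of range(n) under Pre_solve, so pyGetD's default is
-- never read there (outside Pre_solve the Python raises IndexError).
def solve (n : Int) (arr : List Int) : Int :=
  let b := (PySem.List.pyRange 0 n 1).map (fun i => PySem.List.pyGetD arr i 0 - i)
  let dict_arr := (PySem.List.pyRange 0 n 1).foldl (fun d i =>
      let key := PySem.List.pyGetD b i 0
      let d' := if d.contains key then d else d.insert key 0   -- if b[i] not in dict_arr: dict_arr[b[i]] = 0
      d'.insert key (d'.getD key 0 + 1)) PySem.Dict.empty      -- dict_arr[b[i]] += 1
  dict_arr.items.foldl (fun count kv =>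
      if kv.2 > 1 then count + PySem.Int.floordiv (kv.2 * (kv.2 - 1)) 2 else count) 0

-- ===== PORT B =====
-- loop body of Source B: state (prev, run, count); 'v == prev' with prev = None is False
def pvStep (s : Option Int × Int × Int) (v : Int) : Option Int × Int × Int :=
  if some v = s.1 then (some v, s.2.1 + 1, s.2.2 + (s.2.1 + 1)) else (some v, 0, s.2.2)

def solve_alt (n : Int) (arr : List Int) : Int :=
  let vals := PySem.List.sorted ((PySem.List.pyRange 0 n 1).map
      (fun i => PySem.List.pyGetD arr i 0 - i)) (fun x => x) false
  (vals.foldl pvStep (none, 0, 0)).2.2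

-- ===== PRECONDITION & SPEC =====
-- Pre_solve: the Python raises IndexError on arr[i] exactly when n > len(arr); only those inputs are excluded.
def Pre_solve (n : Int) (arr : List Int) : Prop := n ≤ (arr.length : Int)
instance (n : Int) (arr : List Int) : Decidable (Pre_solve n arr) := by unfold Pre_solve; infer_instance
def pvWitness_solve : Int × List Int := (4, [3, 1, 4, 2])
def Spec_solve (n : Int) (arr : List Int) (out : Int) : Prop := out = solve_alt n arr
instance (n : Int) (arr : List Int) (out : Int) : Decidable (Spec_solve n arr out) := by unfold Spec_solve; infer_instance

-- ===== CLAIM (what is proved, stated in full; the proofs are below) =====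
def Claim_equal_solve : Prop := ∀ (n : Int) (arr : List Int), Dom_solve n arr → Pre_solve n arr → Spec_solve n arr (solve n arr)

-- ===== LEMMAS AND PROOFS =====

-- the per-key summand of A's final loop
def pvF (m : Int) : Int := if m > 1 then PySem.Int.floordiv (m * (m - 1)) 2 else 0

-- the common list of values arr[i] - i, i in range(n)
def pvVals (n : Int) (arr : List Int) : List Int :=
  (PySem.List.pyRange 0 n 1).map (fun i => PySem.List.pyGetD arr i 0 - i)

-- the quantity both programs compute: sum over the distinct values of C(multiplicity, 2)
def pvG (vs : List Int) : Int :=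
  ((PySem.Set.ofList vs).map (fun k => pvF ((vs.count k : Int)))).sum

lemma pvF_succ (m : Nat) : pvF ((m : Int) + 1) = pvF (m : Int) + (m : Int) := by
  unfold pvF
  rcases m with _ | m
  · decide
  · rcases m with _ | m
    · decide
    · have h2 : (0:Int) < 2 := by decide
      rw [PySem.Int.floordiv_eq_ediv_of_pos h2, PySem.Int.floordiv_eq_ediv_of_pos h2]
      have h1 : ((m:Int) + 1 + 1 + 1) * ((m:Int) + 1 + 1 + 1 - 1)
          = ((m:Int) + 1 + 1) * ((m:Int) + 1 + 1 - 1) + ((m:Int) + 1 + 1) * 2 := by ring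
      push_cast
      rw [h1, Int.add_mul_ediv_right _ _ (by decide : (2:Int) ≠ 0)]
      split_ifs <;> omega

-- A's dict-building step ('insert 0 if absent, then += 1') is the plain counter step
lemma pvA_step (d : PySem.Dict Int Int) (key : Int) :
    (let d' := if d.contains key then d else d.insert key 0
     d'.insert key (d'.getD key 0 + 1)) = d.insert key (d.getD key 0 + 1) := by
  by_cases h : d.contains key = true
  · simp [h]
  · simp only [Bool.not_eq_true] at h
    simp [h, PySem.Dict.getD_insert_self, PySem.Dict.insert_insert_self,
      PySem.Dict.getD_of_not_contains d 0 h]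

-- reading b back by index over range(n) gives b itself
lemma pvRange_map_getD (n : Int) (arr : List Int) :
    (PySem.List.pyRange 0 n 1).map
      (fun i => PySem.List.pyGetD (pvVals n arr) i 0) = pvVals n arr := by
  by_cases hn : n ≤ 0
  · have h : PySem.List.pyRange 0 n 1 = [] := by simp [PySem.List.pyRange]; omega
    simp [pvVals, h]
  · have hlen : PySem.List.len (pvVals n arr) = n := by
      obtain ⟨m, rfl⟩ : ∃ m : Nat, n = (m : Int) := ⟨n.toNat, by omega⟩
      simp [pvVals, PySem.List.len, PySem.List.pyRange_zero_natCast]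
    have := PySem.List.map_pyGetD_pyRange_zero (pvVals n arr) 0
    rw [hlen] at this
    exact this

-- A's value is the sum of C(count,2) over the distinct values of arr[i]-i
lemma pvA_eq (n : Int) (arr : List Int) : solve n arr = pvG (pvVals n arr) := by
  show ((PySem.List.pyRange 0 n 1).foldl (fun d i =>
      let key := PySem.List.pyGetD (pvVals n arr) i 0
      let d' := if d.contains key then d else d.insert key 0
      d'.insert key (d'.getD key 0 + 1)) PySem.Dict.empty).items.foldl
      (fun count kv => if kv.2 > 1 then count + PySem.Int.floordiv (kv.2 * (kv.2 - 1)) 2 else count) 0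
      = _
  rw [PySem.List.foldl_congr_mem _ _
        (fun d i => d.insert (PySem.List.pyGetD (pvVals n arr) i 0)
          (d.getD (PySem.List.pyGetD (pvVals n arr) i 0) 0 + 1)) _
        (fun acc x _ => pvA_step acc _)]
  rw [show (List.foldl (fun d i =>
        d.insert (PySem.List.pyGetD (pvVals n arr) i 0)
          (d.getD (PySem.List.pyGetD (pvVals n arr) i 0) 0 + 1))
        PySem.Dict.empty (PySem.List.pyRange 0 n 1))
      = List.foldl (fun (d : PySem.Dict Int Int) (key : Int) => d.insert key (d.getD key 0 + 1))
          PySem.Dict.empty ((PySem.List.pyRange 0 n 1).map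
            (fun i => PySem.List.pyGetD (pvVals n arr) i 0))
      from (List.foldl_map (f := fun i => PySem.List.pyGetD (pvVals n arr) i 0)
        (g := fun (d : PySem.Dict Int Int) (key : Int) => d.insert key (d.getD key 0 + 1))
        (l := PySem.List.pyRange 0 n 1) (init := PySem.Dict.empty)).symm]
  rw [pvRange_map_getD, PySem.Dict.foldl_insert_getD_add_one_eq_counter,
      PySem.Dict.items_counter]
  rw [List.foldl_map]
  rw [PySem.List.foldl_congr_mem _ _
        (fun (acc : Int) (k : Int) => acc + pvF (((pvVals n arr).count k : Int))) _
        (by intro acc x _; simp only [pvF]; split_ifs <;> simp)]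
  rw [PySem.List.foldl_add, zero_add]
  rfl

-- updating one key of a sum indexed by a duplicate-free list
lemma pvSum_update {S : List Int} {f g : Int → Int} {x : Int} (hnd : S.Nodup) (hx : x ∈ S)
    (h : ∀ k ∈ S, k ≠ x → f k = g k) :
    (S.map f).sum = (S.map g).sum + (f x - g x) := by
  induction S with
  | nil => cases hx
  | cons a t ih =>
    rcases List.mem_cons.mp hx with rfl | hxt
    · have : ∀ k ∈ t, f k = g k := fun k hk =>
        h k (List.mem_cons_of_mem _ hk) (by rintro rfl; exact (List.nodup_cons.mp hnd).1 hk)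
      simp [List.map_congr_left this]
      ring
    · have ha : f a = g a := h a (List.mem_cons_self) (by rintro rfl; exact (List.nodup_cons.mp hnd).1 hxt)
      simp only [List.map_cons, List.sum_cons, ha,
        ih (List.nodup_cons.mp hnd).2 hxt (fun k hk => h k (List.mem_cons_of_mem _ hk))]
      ring

-- appending one value to the multiset adds its previous multiplicity many new pairs
lemma pvG_append (vs : List Int) (x : Int) :
    pvG (vs ++ [x]) = pvG vs + (vs.count x : Int) := by
  unfold pvG
  have hS : PySem.Set.ofList (vs ++ [x]) = PySem.Set.add (PySem.Set.ofList vs) x := by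
    rw [PySem.Set.ofList_eq_foldl, PySem.Set.ofList_eq_foldl, List.foldl_append]
    rfl
  by_cases hx : x ∈ vs
  · have hc : (PySem.Set.ofList vs).contains x = true := by
      simpa [PySem.Set.contains] using (PySem.Set.mem_ofList vs x).mpr hx
    rw [hS]
    unfold PySem.Set.add
    rw [hc, if_pos rfl]
    rw [pvSum_update (f := fun k => pvF ((List.count k (vs ++ [x]) : Int)))
          (g := fun k => pvF ((List.count k vs : Int)))
          (PySem.Set.nodup_ofList vs) ((PySem.Set.mem_ofList vs x).mpr hx)
          (fun k _ hk => by
            have hce : List.count k (vs ++ [x]) = List.count k vs := by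
              rw [List.count_append, List.count_singleton]
              simp [beq_iff_eq, Ne.symm hk]
            simp only [hce])]
    have hcnt : List.count x (vs ++ [x]) = List.count x vs + 1 := by
      rw [List.count_append, List.count_singleton]; simp
    rw [hcnt]
    push_cast
    rw [pvF_succ]
    ring
  · have hc : (PySem.Set.ofList vs).contains x = false := by
      have : x ∉ PySem.Set.ofList vs := fun h => hx ((PySem.Set.mem_ofList vs x).mp h)
      simpa [PySem.Set.contains] using this
    rw [hS]
    unfold PySem.Set.add
    rw [hc, if_neg (by simp)]
    rw [List.map_append, List.sum_append]
    have hcong : ∀ k ∈ PySem.Set.ofList vs,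
        pvF ((List.count k (vs ++ [x]) : Int)) = pvF ((List.count k vs : Int)) := by
      intro k hk
      have hkx : k ≠ x := fun h => hx (h ▸ (PySem.Set.mem_ofList vs k).mp hk)
      rw [List.count_append, List.count_singleton]
      simp [beq_iff_eq, Ne.symm hkx]
    rw [List.map_congr_left hcong]
    have h0 : List.count x vs = 0 := List.count_eq_zero.mpr hx
    simp [h0, pvF]

-- pvG only depends on the multiset of values
lemma pvG_perm {vs ws : List Int} (h : vs.Perm ws) : pvG vs = pvG ws := by
  unfold pvG
  have hmem : ∀ a, a ∈ PySem.Set.ofList vs ↔ a ∈ PySem.Set.ofList ws := by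
    intro a
    rw [PySem.Set.mem_ofList, PySem.Set.mem_ofList]
    exact ⟨fun hv => h.mem_iff.mp hv, fun hw => h.mem_iff.mpr hw⟩
  have hperm : (PySem.Set.ofList vs).Perm (PySem.Set.ofList ws) :=
    (List.perm_ext_iff_of_nodup (PySem.Set.nodup_ofList vs) (PySem.Set.nodup_ofList ws)).mpr hmem
  have hcnt : ∀ k : Int, vs.count k = ws.count k := fun k => h.count_eq k
  calc ((PySem.Set.ofList vs).map (fun k => pvF ((vs.count k : Int)))).sum
      = ((PySem.Set.ofList vs).map (fun k => pvF ((ws.count k : Int)))).sum := by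
        simp only [hcnt]
    _ = ((PySem.Set.ofList ws).map (fun k => pvF ((ws.count k : Int)))).sum :=
        (hperm.map _).sum_eq

-- in a sorted list every element is at most the last one
lemma pvLe_getLast (ws : List Int) (hs : ws.Pairwise (· ≤ ·)) (a : Int) (ha : a ∈ ws)
    (l : Int) (hl : ws.getLast? = some l) : a ≤ l := by
  induction ws using List.reverseRecOn with
  | nil => cases ha
  | append_singleton t x _ =>
    have hlx : l = x := by
      have hx : (t ++ [x]).getLast? = some x := by simp
      rw [hx] at hl
      injection hl with h
      omega
    subst hlx
    rcases List.mem_append.mp ha with h | h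
    · exact (List.pairwise_append.mp hs).2.2 a h l (by simp)
    · simp at h; omega

-- invariant of B's scan over a sorted list: count so far = pvG, run = multiplicity of the
-- last element minus one
lemma pvScan (ws : List Int) (hs : ws.Pairwise (· ≤ ·)) :
    ws.foldl pvStep (none, 0, 0) =
      (match ws.getLast? with
       | none => ((none : Option Int), (0 : Int), (0 : Int))
       | some l => (some l, (ws.count l : Int) - 1, pvG ws)) := by
  induction ws using List.reverseRecOn with
  | nil => rfl
  | append_singleton t x ih =>
    have hpa := List.pairwise_append.mp hs
    have ht : t.Pairwise (· ≤ ·) := hpa.1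
    have hle : ∀ a ∈ t, a ≤ x := fun a ha => hpa.2.2 a ha x (by simp)
    rw [List.foldl_append, ih ht]
    have hlast : (t ++ [x]).getLast? = some x := by simp
    cases htl : t.getLast? with
    | none =>
      have ht0 : t = [] := by cases t with | nil => rfl | cons a s => simp at htl
      subst ht0
      have hg1 : pvG [x] = 0 := by
        have h := pvG_append [] x
        simpa [show pvG ([] : List Int) = 0 from rfl] using h
      simp only [List.foldl_cons, List.foldl_nil, pvStep, hlast]
      simp [hg1]
    | some l =>
      have hlmem : l ∈ t := List.mem_of_getLast? htl
      simp only [List.foldl_cons, List.foldl_nil, hlast]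
      by_cases hxl : x = l
      · subst hxl
        have hcnt : List.count x (t ++ [x]) = List.count x t + 1 := by
          rw [List.count_append, List.count_singleton]; simp
        simp only [pvStep]
        rw [if_pos trivial, pvG_append, hcnt]
        refine congrArg (Prod.mk (some x)) (congrArg₂ Prod.mk ?_ ?_) <;> push_cast <;> ring
      · have hne : some x ≠ some l := by simp [hxl]
        simp only [pvStep]
        rw [if_neg hne]
        have hxnot : x ∉ t := by
          intro hxt
          exact hxl (le_antisymm (pvLe_getLast t ht x hxt l htl) (hle l hlmem))
        have hc0 : List.count x t = 0 := List.count_eq_zero.mpr hxnot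
        have hcnt : List.count x (t ++ [x]) = 1 := by
          rw [List.count_append, List.count_singleton, hc0]; simp
        rw [pvG_append, hcnt, hc0]
        refine congrArg (Prod.mk (some x)) (congrArg₂ Prod.mk ?_ ?_) <;> push_cast <;> ring

-- B's value: scan the sorted values
lemma pvB_eq (n : Int) (arr : List Int) :
    solve_alt n arr = pvG (PySem.List.sorted (pvVals n arr) (fun x => x) false) := by
  show (List.foldl pvStep (((none : Option Int), (0 : Int), (0 : Int)))
      (PySem.List.sorted (pvVals n arr) (fun x => x) false)).2.2 = _
  rw [pvScan _ (PySem.List.sorted_pairwise (xs := pvVals n arr) (key := fun x => x))]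
  cases h : (PySem.List.sorted (pvVals n arr) (fun x => x) false).getLast? with
  | none =>
    have he : PySem.List.sorted (pvVals n arr) (fun x => x) false = [] := by
      cases hc : PySem.List.sorted (pvVals n arr) (fun x => x) false with
      | nil => rfl
      | cons a s => rw [hc] at h; simp [List.getLast?_eq_some_getLast] at h
    simp [he, pvG]
  | some l => simp

-- ===== VERDICT (by name: the statement is the Claim_ definition above) =====
theorem solve_spec : Claim_equal_solve := by
  intro n arr _ _
  unfold Spec_solve
  rw [pvA_eq n arr, pvB_eq, pvG_perm (PySem.List.sorted_perm (pvVals n arr) (fun x => x) false)]
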